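-- pv_equiv track=rewrite | github.com/Viet281101/ITLMAU | Semestre_6_L3/Ingénierie_des_langues/TPs/TP4/exo_3.py | count_transitions
-- ===== SOURCE A (Python) =====
-- def count_transitions(corpus, ordre) -> dict:
-- 	'''
-- 	paramètre : corpus (séquence de séquence de tokens)
-- 	returns : dictionnaire à deux niveaux contenant pour chaque mot le nombre d'apparitions pour chaque mot suivant possible.
-- 	'''
-- 	transitions = {}
--
-- 	for sentence in corpus:
-- 		for i in range(len(sentence)-ordre):
-- 			if tuple(sentence[i:i+ordre]) not in transitions:
-- 				transitions[tuple(sentence[i:i+ordre])] = {}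
-- 			if sentence[i+ordre] not in transitions[tuple(sentence[i:i+ordre])]:
-- 				transitions[tuple(sentence[i:i+ordre])][sentence[i+ordre]] = 0
-- 			transitions[tuple(sentence[i:i+ordre])][sentence[i+ordre]] += 1
--
-- 	return transitions
-- ===== SOURCE B (Python) =====
-- def count_transitions(corpus, ordre) -> dict:
-- 	'''Group-by re-implementation: flatten the corpus into the list of all
-- 	(prefix-tuple, next-word) transition pairs, then for each distinct prefix
-- 	(in first-occurrence order) collect its following words and count each
-- 	distinct one with list.count. No incremental dict mutation at all.'''
-- 	pairs = [(tuple(s[i:i+ordre]), s[i+ordre])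
-- 	         for s in corpus for i in range(len(s)-ordre)]
-- 	result = {}
-- 	for prefix in dict.fromkeys(p for p, _ in pairs):
-- 		nexts = [n for p, n in pairs if p == prefix]
-- 		result[prefix] = {n: nexts.count(n) for n in dict.fromkeys(nexts)}
-- 	return result
-- ===== Notes on version B (the rewrite author's own statement) =====
-- stated objective: alternative
-- what changed: B replaces A's incremental nested-dict increments by a group-by: it flattens the corpus into the flat list of (prefix, next) transition pairs once, then for each distinct prefix (first-occurrence order) collects the following words by a filter scan and counts each distinct one with list.count, building the nested dict in one shot with no mutation during counting.
import Mathlib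
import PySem

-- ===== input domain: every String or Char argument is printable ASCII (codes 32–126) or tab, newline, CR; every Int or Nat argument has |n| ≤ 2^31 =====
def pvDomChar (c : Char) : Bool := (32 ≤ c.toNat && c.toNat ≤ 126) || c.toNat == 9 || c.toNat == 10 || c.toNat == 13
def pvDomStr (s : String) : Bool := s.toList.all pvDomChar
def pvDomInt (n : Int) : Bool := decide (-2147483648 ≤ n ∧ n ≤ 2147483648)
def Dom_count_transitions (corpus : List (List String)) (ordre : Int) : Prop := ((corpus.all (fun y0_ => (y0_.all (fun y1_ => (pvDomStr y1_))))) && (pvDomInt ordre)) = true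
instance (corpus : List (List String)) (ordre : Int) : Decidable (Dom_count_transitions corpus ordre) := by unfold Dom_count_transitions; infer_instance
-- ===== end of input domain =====

-- B replaces A's incremental nested-dict updates by a group-by: flatten the corpus into the list of
-- all (prefix, next) pairs once, then for each distinct prefix collect its next-words and count each
-- distinct one with list.count — no dict mutation during counting; same value, proved equal.

-- ===== PORT A =====
-- A's loop body (its three nested-dict statements), acting on the pair (prefix, next) that index i denotes
def pvStepA (t : PySem.Dict (List String) (PySem.Dict String Int)) (p : List String × String) :
    PySem.Dict (List String) (PySem.Dict String Int) :=
  let t1 := if t.contains p.1 then t else t.insert p.1 PySem.Dict.empty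
  let inner := t1.getD p.1 PySem.Dict.empty
  let inner1 := if inner.contains p.2 then inner else inner.insert p.2 0
  t1.insert p.1 (inner1.insert p.2 (inner1.getD p.2 0 + 1))

def count_transitions (corpus : List (List String)) (ordre : Int) : List (List String × List (String × Int)) :=
  ((corpus.foldl (fun transitions sentence =>
      (PySem.List.pyRange 0 (PySem.List.len sentence - ordre) 1).foldl (fun t i =>
        -- sentence[i+ordre]: pyGetD is exact under Pre_ (the index is in range wherever Python does not raise)
        pvStepA t (PySem.List.slice sentence (some i) (some (i + ordre)),
                   PySem.List.pyGetD sentence (i + ordre) "")) transitions)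
    PySem.Dict.empty).items).map (fun q => (q.1, q.2.items))

-- ===== PORT B =====
def count_transitions_alt (corpus : List (List String)) (ordre : Int) : List (List String × List (String × Int)) :=
  -- pairs = [(tuple(s[i:i+ordre]), s[i+ordre]) for s in corpus for i in range(len(s)-ordre)]
  let pairs := corpus.flatMap (fun s =>
    (PySem.List.pyRange 0 (PySem.List.len s - ordre) 1).map (fun i =>
      (PySem.List.slice s (some i) (some (i + ordre)),
       PySem.List.pyGetD s (i + ordre) "")))
  -- for prefix in dict.fromkeys(…): result[prefix] = {n: nexts.count(n) for n in dict.fromkeys(nexts)}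
  -- (the keys are distinct and inserted in order, so the result dict IS this list)
  (PySem.List.dedup (pairs.map (fun p => p.1))).map (fun pfx =>
    let nexts := (pairs.filter (fun p => p.1 == pfx)).map (fun p => p.2)
    (pfx, (PySem.List.dedup nexts).map (fun n => (n, (nexts.count n : Int)))))

-- ===== PRECONDITION & SPEC =====
-- Pre_ excludes exactly the inputs on which A raises IndexError: some sentence with ordre < -len(sentence),
-- where the read sentence[i+ordre] falls below Python's negative-index range.
def Pre_count_transitions (corpus : List (List String)) (ordre : Int) : Prop :=
  ∀ s ∈ corpus, -(s.length : Int) ≤ ordre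
instance (corpus : List (List String)) (ordre : Int) : Decidable (Pre_count_transitions corpus ordre) := by
  unfold Pre_count_transitions; infer_instance
def pvWitness_count_transitions : List (List String) × Int := ([["a", "b", "a", "b", "c"], ["b", "a"]], 1)

def Spec_count_transitions (corpus : List (List String)) (ordre : Int) (out : List (List String × List (String × Int))) : Prop := out = count_transitions_alt corpus ordre
instance (corpus : List (List String)) (ordre : Int) (out : List (List String × List (String × Int))) : Decidable (Spec_count_transitions corpus ordre out) := by unfold Spec_count_transitions; infer_instance

-- ===== CLAIM (what is proved, stated in full; the proofs are below) =====
def Claim_equal_count_transitions : Prop := ∀ (corpus : List (List String)) (ordre : Int), Dom_count_transitions corpus ordre → Pre_count_transitions corpus ordre → Spec_count_transitions corpus ordre (count_transitions corpus ordre)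

-- ===== LEMMAS AND PROOFS =====

-- A's loop body is a single keyed update: insert at p.1 the old inner dict with p.2 bumped
theorem pvStepA_modify (r : PySem.Dict (List String) (PySem.Dict String Int)) (p : List String × String) :
    pvStepA r p = r.insert p.1 ((r.getD p.1 PySem.Dict.empty).modify p.2 0 (· + 1)) := by
  unfold pvStepA PySem.Dict.modify
  by_cases h : r.contains p.1 = true
  · simp only [h, if_true]
    set I := r.getD p.1 PySem.Dict.empty with hI
    by_cases h2 : I.contains p.2 = true
    · simp only [h2, if_true]
    · have h2f : I.contains p.2 = false := by simpa using h2
      simp only [h2f, Bool.false_eq_true, if_false]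
      rw [PySem.Dict.getD_insert_self, PySem.Dict.insert_insert_self,
          PySem.Dict.getD_of_not_contains _ _ h2f]
  · have hf : r.contains p.1 = false := by simpa using h
    simp only [hf, Bool.false_eq_true, if_false]
    rw [PySem.Dict.getD_insert_self, PySem.Dict.getD_of_not_contains _ _ hf,
        PySem.Dict.insert_insert_self]
    congr 1
    simp only [PySem.Dict.contains_empty, Bool.false_eq_true, if_false]
    rw [PySem.Dict.getD_insert_self, PySem.Dict.insert_insert_self, PySem.Dict.getD_empty]

-- the inner dict A builds at key k is the counting loop over exactly the next-words of k
theorem pv_getD (P : List (List String × String)) (d : PySem.Dict (List String) (PySem.Dict String Int))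
    (k : List String) :
    (P.foldl pvStepA d).getD k PySem.Dict.empty
      = ((P.filter (fun p => p.1 == k)).map (fun p => p.2)).foldl
          (fun i n => i.modify n 0 (· + 1)) (d.getD k PySem.Dict.empty) := by
  induction P generalizing d with
  | nil => rfl
  | cons p P ih =>
    rw [List.foldl_cons, ih, pvStepA_modify]
    by_cases hk : p.1 = k
    · simp [hk]
    · have hbf : (p.1 == k) = false := by simpa using hk
      rw [PySem.Dict.getD_insert, if_neg (fun e => hk e.symm)]
      simp [hbf]

-- A's whole fold, rendered as B's group-by over any flat list of (prefix, next) pairs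
theorem pv_main (P : List (List String × String)) :
    (P.foldl pvStepA PySem.Dict.empty).items.map (fun q => (q.1, q.2.items))
      = (PySem.Set.ofList (P.map (fun p => p.1))).map (fun k =>
          (k, (PySem.Set.ofList ((P.filter (fun p => p.1 == k)).map (fun p => p.2))).map
              (fun n => (n, (((P.filter (fun p => p.1 == k)).map (fun p => p.2)).count n : Int))))) := by
  have hF : pvStepA = fun t p => t.insert p.1 ((t.getD p.1 PySem.Dict.empty).modify p.2 0 (· + 1)) :=
    funext fun t => funext fun p => pvStepA_modify t p
  have hnodup : (P.foldl pvStepA PySem.Dict.empty).keys.Nodup := by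
    rw [hF]
    exact PySem.Dict.nodup_keys_foldl_insert_key P (fun p => p.1) _ _ PySem.Dict.nodup_keys_empty
  have hkeys : (P.foldl pvStepA PySem.Dict.empty).keys = PySem.Set.ofList (P.map (fun p => p.1)) := by
    rw [hF, PySem.Dict.keys_foldl_insert_key]
    simp [PySem.Dict.keys_empty, PySem.Set.update_nil_left]
  rw [PySem.Dict.items_eq_map_keys _ hnodup PySem.Dict.empty, hkeys, List.map_map]
  apply List.map_congr_left
  intro k hk
  simp only [Function.comp]
  rw [pv_getD, PySem.Dict.getD_empty, ← PySem.Dict.counter_eq_foldl, PySem.Dict.items_counter]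

-- ===== VERDICT (by name: the statement is the Claim_ definition above) =====
theorem count_transitions_spec : Claim_equal_count_transitions := by
  intro corpus ordre _ _
  unfold Spec_count_transitions count_transitions count_transitions_alt
  simp only [PySem.List.dedup_eq_ofList]
  have hfold : ∀ pairsOf : List String → List (List String × String),
      corpus.foldl (fun t s => (pairsOf s).foldl pvStepA t) PySem.Dict.empty
        = (corpus.flatMap pairsOf).foldl pvStepA PySem.Dict.empty := by
    intro pairsOf; rw [List.foldl_flatMap]
  rw [show (corpus.foldl (fun transitions sentence =>
        (PySem.List.pyRange 0 (PySem.List.len sentence - ordre) 1).foldl (fun t i =>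
          pvStepA t (PySem.List.slice sentence (some i) (some (i + ordre)),
                     PySem.List.pyGetD sentence (i + ordre) "")) transitions)
      PySem.Dict.empty)
      = ((corpus.flatMap (fun s =>
          (PySem.List.pyRange 0 (PySem.List.len s - ordre) 1).map (fun i =>
            (PySem.List.slice s (some i) (some (i + ordre)),
             PySem.List.pyGetD s (i + ordre) "")))).foldl pvStepA PySem.Dict.empty) from by
        rw [← hfold]
        simp only [List.foldl_map]]
  exact pv_main _
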